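-- pv_equiv track=rewrite | github.com/pennmem/pybeh | pybeh/mask_maker.py | make_clean_recalls_mask2d
-- ===== SOURCE A (Python) =====
-- import copy
--
-- def make_clean_recalls_mask2d(data):
--     """makes a clean mask without repetition and intrusion"""
--     result = copy.deepcopy(data)
--     for num, item in enumerate(data):
--         seen = []
--         for index, recall in enumerate(item):
--
--             if recall > 0 and recall not in seen:
--                 result[num][index] = 1
--                 seen.append(recall)
--             else:
--                 result[num][index] = 0
--     return result
-- ===== SOURCE B (Python) =====
-- def make_clean_recalls_mask2d(data):
--     """makes a clean mask without repetition and intrusion"""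
--     result = [[0] * len(item) for item in data]
--     for row, item in zip(result, data):
--         for recall in set(item):
--             if recall > 0:
--                 row[item.index(recall)] = 1
--     return result
-- ===== Notes on version B (the rewrite author's own statement) =====
-- stated objective: alternative
-- what changed: Instead of scanning each row position by position with a running 'seen' accumulator deciding 1/0 per cell, B builds an all-zero mask and then scatters a 1 at item.index(recall) (the first occurrence) for each distinct positive value of the row's value set.
import Mathlib
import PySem

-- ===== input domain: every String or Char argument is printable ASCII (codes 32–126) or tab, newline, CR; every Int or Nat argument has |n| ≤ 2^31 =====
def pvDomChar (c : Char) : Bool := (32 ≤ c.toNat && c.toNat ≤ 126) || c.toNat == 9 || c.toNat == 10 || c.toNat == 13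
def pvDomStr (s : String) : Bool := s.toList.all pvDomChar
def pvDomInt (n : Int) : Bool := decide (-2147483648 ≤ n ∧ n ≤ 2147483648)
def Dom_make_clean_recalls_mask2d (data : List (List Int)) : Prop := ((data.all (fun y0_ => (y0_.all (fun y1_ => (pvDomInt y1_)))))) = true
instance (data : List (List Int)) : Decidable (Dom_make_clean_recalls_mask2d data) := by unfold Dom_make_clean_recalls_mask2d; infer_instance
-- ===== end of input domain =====

-- B builds an all-zero mask and scatters a 1 at the first occurrence of each distinct
-- positive value, instead of A's positional scan with a 'seen' accumulator (objective: alternative).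

-- ===== PORT A =====
-- row loop of A: seen accumulator, result cells written left to right
-- (every cell of each row is overwritten, so the deepcopied row equals the built row)
def make_clean_recalls_mask2d (data : List (List Int)) : List (List Int) :=
  data.map (fun item =>
    (item.foldl (fun st rc =>
      if 0 < rc ∧ rc ∉ st.2 then (st.1 ++ [1], st.2 ++ [rc])
      else (st.1 ++ [0], st.2)) (([], []) : List Int × List Int)).1)

-- ===== PORT B =====
-- per row: zero mask, then for each rcl in set(item) with rcl > 0, write a 1 at
-- item.index(rcl); the writes hit pairwise distinct cells, so the result does not
-- depend on the set's iteration order (Python hash order vs. Set.ofList order).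
-- item.index(rcl) never raises here since rcl ∈ item; the `none` branch is unreachable.
def make_clean_recalls_mask2d_alt (data : List (List Int)) : List (List Int) :=
  data.map (fun item =>
    (PySem.Set.ofList item).foldl (fun (row : List Int) (rcl : Int) =>
      if 0 < rcl then
        match PySem.List.index? item rcl with
        | some i => row.set i (1 : Int)
        | none => row
      else row)
      (item.map (fun _ => (0 : Int))))

-- ===== PRECONDITION & SPEC =====
def Spec_make_clean_recalls_mask2d (data : List (List Int)) (out : List (List Int)) : Prop := out = make_clean_recalls_mask2d_alt data
instance (data : List (List Int)) (out : List (List Int)) : Decidable (Spec_make_clean_recalls_mask2d data out) := by unfold Spec_make_clean_recalls_mask2d; infer_instance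

-- ===== CLAIM (what is proved, stated in full; the proofs are below) =====
def Claim_equal_make_clean_recalls_mask2d : Prop := ∀ (data : List (List Int)), Dom_make_clean_recalls_mask2d data → Spec_make_clean_recalls_mask2d data (make_clean_recalls_mask2d data)

-- ===== LEMMAS AND PROOFS =====

-- common specification of one row of the mask: 1 exactly at positive first occurrences
def pvMaskRow (item : List Int) : List Int :=
  (PySem.List.enumerate item).map (fun p =>
    if 0 < p.2 ∧ PySem.List.index? item p.2 = some p.1.toNat then 1 else 0)

-- first-occurrence index after a clean prefix
lemma pvIdx_bit (pre rest : List Int) (r : Int) :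
    PySem.List.index? (pre ++ r :: rest) r = some pre.length ↔ r ∉ pre := by
  rw [PySem.List.index?_eq_some_iff]
  constructor
  · rintro ⟨pre', suf, heq, hlen, hnot⟩
    obtain ⟨h1, -⟩ := List.append_inj heq hlen.symm
    exact h1 ▸ hnot
  · intro h
    exact ⟨pre, rest, rfl, rfl, h⟩

-- A's side: the fold over the remaining row produces the mask bits, given that
-- `seen` holds exactly the positive values of the processed prefix
lemma pvRow_main (item : List Int) :
    ∀ rest pre acc seen, item = pre ++ rest →
      (∀ r : Int, r ∈ seen ↔ 0 < r ∧ r ∈ pre) →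
      (rest.foldl (fun st rc =>
          if 0 < rc ∧ rc ∉ st.2 then (st.1 ++ [1], st.2 ++ [rc])
          else (st.1 ++ [0], st.2)) ((acc, seen) : List Int × List Int)).1
        = acc ++ (PySem.List.enumerate rest pre.length).map (fun p =>
            if 0 < p.2 ∧ PySem.List.index? item p.2 = some p.1.toNat then 1 else 0) := by
  intro rest
  induction rest with
  | nil => intro pre acc seen _ _; simp
  | cons r rest ih =>
    intro pre acc seen hitem hseen
    have hitem' : item = (pre ++ [r]) ++ rest := by simp [hitem]
    have hbit : PySem.List.index? item r = some pre.length ↔ r ∉ pre := by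
      rw [hitem]; exact pvIdx_bit pre rest r
    simp only [List.foldl_cons, PySem.List.enumerate_cons, List.map_cons, Int.toNat_natCast]
    by_cases hc : 0 < r ∧ r ∉ seen
    · have hnp : r ∉ pre := fun hp => hc.2 ((hseen r).mpr ⟨hc.1, hp⟩)
      rw [if_pos hc]
      have hseen' : ∀ r' : Int, r' ∈ seen ++ [r] ↔ 0 < r' ∧ r' ∈ pre ++ [r] := by
        intro r'
        simp only [List.mem_append, List.mem_singleton, hseen r']
        constructor
        · rintro (⟨h1, h2⟩ | e)
          · exact ⟨h1, Or.inl h2⟩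
          · exact ⟨e ▸ hc.1, Or.inr e⟩
        · rintro ⟨h1, h2 | e⟩
          · exact Or.inl ⟨h1, h2⟩
          · exact Or.inr e
      have := ih (pre ++ [r]) (acc ++ [1]) (seen ++ [r]) hitem' hseen'
      rw [this, if_pos ⟨hc.1, hbit.mpr hnp⟩]
      simp [List.append_assoc, List.length_append]
    · rw [if_neg hc]
      have hbit0 : ¬ (0 < r ∧ PySem.List.index? item r = some pre.length) := by
        rintro ⟨h1, h2⟩
        exact hc ⟨h1, fun hs => (hbit.mp h2) ((hseen r).mp hs).2⟩
      have hseen' : ∀ r' : Int, r' ∈ seen ↔ 0 < r' ∧ r' ∈ pre ++ [r] := by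
        intro r'
        rw [hseen r']
        simp only [List.mem_append, List.mem_singleton]
        constructor
        · rintro ⟨h1, h2⟩; exact ⟨h1, Or.inl h2⟩
        · rintro ⟨h1, h2 | e⟩
          · exact ⟨h1, h2⟩
          · subst e
            exact ⟨h1, ((hseen r').mp (by
              by_contra hns
              exact hc ⟨h1, hns⟩)).2⟩
      have := ih (pre ++ [r]) (acc ++ [0]) seen hitem' hseen'
      rw [this, if_neg hbit0]
      simp [List.append_assoc, List.length_append]

lemma pvRowA_eq (item : List Int) :
    (item.foldl (fun st rc =>
        if 0 < rc ∧ rc ∉ st.2 then (st.1 ++ [1], st.2 ++ [rc])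
        else (st.1 ++ [0], st.2)) (([], []) : List Int × List Int)).1
      = pvMaskRow item := by
  have := pvRow_main item item [] [] [] (by simp) (by simp)
  simpa [pvMaskRow] using this

-- B's side --------------------------------------------------------------

-- one step of B's scatter loop
def pvScatter (item : List Int) (row : List Int) (rcl : Int) : List Int :=
  if 0 < rcl then
    match PySem.List.index? item rcl with
    | some i => row.set i 1
    | none => row
  else row

lemma pvScatter_length (item row : List Int) (r : Int) :
    (pvScatter item row r).length = row.length := by
  unfold pvScatter
  split_ifs with h
  · cases hidx : PySem.List.index? item r <;> simp
  · rfl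

lemma pvFoldB_length (item : List Int) (s row : List Int) :
    (s.foldl (pvScatter item) row).length = row.length := by
  induction s generalizing row with
  | nil => rfl
  | cons r s ih => rw [List.foldl_cons, ih, pvScatter_length]

-- the entry of the scatter fold: 1 where a value of s hits its first occurrence, else untouched
lemma pvFoldB_getElem? (item : List Int) (s : List Int) (row : List Int)
    (hlen : row.length = item.length) (j : Nat) (hj : j < item.length) :
    (s.foldl (pvScatter item) row)[j]?
      = if 0 < item[j] ∧ item[j] ∈ s ∧ PySem.List.index? item item[j] = some j
        then some 1 else row[j]? := by
  induction s generalizing row with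
  | nil => simp
  | cons r s ih =>
    rw [List.foldl_cons, ih (pvScatter item row r) (by rw [pvScatter_length]; exact hlen)]
    by_cases hC : 0 < item[j] ∧ item[j] ∈ s ∧ PySem.List.index? item item[j] = some j
    · rw [if_pos hC, if_pos ⟨hC.1, List.mem_cons_of_mem _ hC.2.1, hC.2.2⟩]
    · rw [if_neg hC]
      by_cases hr : 0 < item[j] ∧ item[j] = r ∧ PySem.List.index? item item[j] = some j
      · rw [if_pos ⟨hr.1, hr.2.1 ▸ List.mem_cons_self, hr.2.2⟩]
        unfold pvScatter
        rw [if_pos (hr.2.1 ▸ hr.1), ← hr.2.1, hr.2.2]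
        simp [hlen ▸ hj]
      · have hcond : ¬ (0 < item[j] ∧ item[j] ∈ r :: s ∧ PySem.List.index? item item[j] = some j) := by
          rintro ⟨h1, hm, h2⟩
          rcases List.mem_cons.mp hm with e | e
          · exact hr ⟨h1, e, h2⟩
          · exact hC ⟨h1, e, h2⟩
        rw [if_neg hcond]
        unfold pvScatter
        split_ifs with hpos
        · cases hidx : PySem.List.index? item r with
          | none => rfl
          | some i =>
            obtain ⟨hi, hval, -⟩ := PySem.List.getElem_of_index?_eq_some hidx
            have hij : i ≠ j := by
              rintro rfl
              exact hcond ⟨hval ▸ hpos, hval ▸ List.mem_cons_self, hval ▸ hidx⟩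
            simp [hij]
        · rfl

lemma pvRowB_eq (item : List Int) :
    (PySem.Set.ofList item).foldl (pvScatter item) (item.map (fun _ => (0 : Int)))
      = pvMaskRow item := by
  apply List.ext_getElem?
  intro j
  by_cases hj : j < item.length
  · rw [pvFoldB_getElem? item _ _ (by simp) j hj]
    have hmem : item[j] ∈ PySem.Set.ofList item :=
      (PySem.Set.mem_ofList _ _).mpr (List.getElem_mem hj)
    simp only [pvMaskRow, List.getElem?_map, PySem.List.getElem?_enumerate,
      List.getElem?_eq_getElem hj, hmem, Option.map_some, zero_add, Int.toNat_natCast,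
      PySem.List.index?_eq_idxOf?, true_and]
    split_ifs
    · rfl
    · simp
  · have h1 : (((PySem.Set.ofList item).foldl (pvScatter item)
        (item.map (fun _ => (0 : Int))))[j]?) = none := by
      rw [List.getElem?_eq_none_iff, pvFoldB_length, List.length_map]
      omega
    have h2 : (pvMaskRow item)[j]? = none := by
      rw [List.getElem?_eq_none_iff]
      simp only [pvMaskRow, List.length_map, PySem.List.length_enumerate]
      omega
    rw [h1, h2]

-- ===== VERDICT (by name: the statement is the Claim_ definition above) =====
theorem make_clean_recalls_mask2d_spec : Claim_equal_make_clean_recalls_mask2d := by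
  intro data _
  unfold Spec_make_clean_recalls_mask2d make_clean_recalls_mask2d make_clean_recalls_mask2d_alt
  refine List.map_congr_left (fun item _ => ?_)
  rw [pvRowA_eq item]
  exact (pvRowB_eq item).symm
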